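-- pv_equiv track=rewrite | github.com/shauming1020/MLDS2018SPRING | hw2-Seq2seqLearning/test.py | remove_dummyword
-- ===== SOURCE A (Python) =====
-- def remove_dummyword(line):
--     stop_words = ['a','an','and','is','at','in','into','is','of','on','to','the','then', 'from', 'with']
--     while line and line[-1] in stop_words:
--         line.pop()
--     return_line = []
--     for i, word in enumerate(line):
--         if word == 'something':
--             if line[max(0,i-1)] == 'a' or line[max(0,i-1)] == 'an':
--                 return_line.pop()
--         return_line.append(word)
--     return return_line
-- ===== SOURCE B (Python) =====
-- def remove_dummyword(line):
--     stop_words = {'a', 'an', 'and', 'is', 'at', 'in', 'into', 'of', 'on', 'to',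
--                   'the', 'then', 'from', 'with'}
--     # trailing trim, kept in place (mutates the argument like the original)
--     k = len(line)
--     while k and line[k - 1] in stop_words:
--         k -= 1
--     del line[k:]
--     # forward scan with look-ahead: skip an article directly before 'something'
--     out = []
--     for cur, nxt in zip(line, line[1:]):
--         if cur in ('a', 'an') and nxt == 'something':
--             continue
--         out.append(cur)
--     if line:
--         out.append(line[-1])
--     return out
-- ===== Notes on version B (the rewrite author's own statement) =====
-- stated objective: alternative
-- what changed: Replaces the append-then-pop pass (pop the previous token when the current word is 'something' and the preceding one is an article) with a forward look-ahead scan over adjacent pairs that simply skips any 'a'/'an' immediately followed by 'something'; the trailing-stopword trim is done by computing the kept length and deleting the tail once instead of repeated pop().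
import Mathlib
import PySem

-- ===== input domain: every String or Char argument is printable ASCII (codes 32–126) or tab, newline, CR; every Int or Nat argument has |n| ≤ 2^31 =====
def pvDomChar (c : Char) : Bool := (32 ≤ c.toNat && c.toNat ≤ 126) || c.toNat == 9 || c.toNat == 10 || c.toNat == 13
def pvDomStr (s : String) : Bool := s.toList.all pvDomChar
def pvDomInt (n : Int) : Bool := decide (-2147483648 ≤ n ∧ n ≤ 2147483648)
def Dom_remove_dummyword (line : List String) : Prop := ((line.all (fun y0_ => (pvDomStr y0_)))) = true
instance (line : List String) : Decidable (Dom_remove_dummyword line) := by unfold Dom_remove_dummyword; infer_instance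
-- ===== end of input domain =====

-- B replaces A's append-then-pop second pass by a forward look-ahead scan over adjacent
-- pairs and trims trailing stopwords by computing the kept length once; same return value
-- (in Python both mutate the argument identically; the theorems are about the return value).


-- ===== PORT A =====
def pvStopWords : List String :=
  ["a","an","and","is","at","in","into","is","of","on","to","the","then","from","with"]

-- 'while line and line[-1] in stop_words: line.pop()'
def pvTrimA (l : List String) : List String :=
  if h : l ≠ [] ∧ (l.getLast?.getD "") ∈ pvStopWords then pvTrimA l.dropLast else l
termination_by l.length
decreasing_by
  have hne := h.1
  cases l with
  | nil => exact absurd rfl hne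
  | cons a t => simp [List.length_dropLast]

def remove_dummyword (line : List String) : List String :=
  let line := pvTrimA line
  -- return_line.pop() never hits an empty list (the previous step always appended a word
  -- that cannot itself trigger a pop), so dropLast is exact here
  (PySem.List.enumerate line 0).foldl
    (fun return_line iw =>
      let i := iw.1; let word := iw.2
      let return_line :=
        if word = "something" ∧
            (PySem.List.pyGetD line (max 0 (i-1)) "" = "a" ∨
             PySem.List.pyGetD line (max 0 (i-1)) "" = "an")
        then return_line.dropLast else return_line
      return_line ++ [word]) []

-- ===== PORT B =====
def pvStopSet : PySem.Set String :=
  PySem.Set.ofList ["a","an","and","is","at","in","into","of","on","to","the","then","from","with"]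

-- 'k = len(line); while k and line[k-1] in stop_words: k -= 1'
def pvKeepLen (l : List String) (k : Nat) : Nat :=
  if k ≠ 0 ∧ PySem.Set.contains pvStopSet (l.getD (k-1) "") then pvKeepLen l (k-1) else k
termination_by k
decreasing_by omega

def remove_dummyword_alt (line : List String) : List String :=
  let line := line.take (pvKeepLen line line.length)   -- del line[k:]
  let out :=
    (line.zip (line.drop 1)).foldl                     -- zip(line, line[1:])
      (fun out cn =>
        if (cn.1 = "a" ∨ cn.1 = "an") ∧ cn.2 = "something" then out
        else out ++ [cn.1]) []
  match line.getLast? with                             -- if line: out.append(line[-1])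
  | some w => out ++ [w]
  | none => out

-- ===== PRECONDITION & SPEC =====
def Spec_remove_dummyword (line : List String) (out : List String) : Prop := out = remove_dummyword_alt line
instance (line : List String) (out : List String) : Decidable (Spec_remove_dummyword line out) := by unfold Spec_remove_dummyword; infer_instance

-- ===== CLAIM (what is proved, stated in full; the proofs are below) =====
def Claim_equal_remove_dummyword : Prop := ∀ (line : List String), Dom_remove_dummyword line → Spec_remove_dummyword line (remove_dummyword line)

-- ===== LEMMAS AND PROOFS =====

theorem pvKeepLen_le (l : List String) (k : Nat) : pvKeepLen l k ≤ k := by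
  induction k with
  | zero => unfold pvKeepLen; simp
  | succ n ih =>
    unfold pvKeepLen
    split
    · simp only [Nat.add_sub_cancel]
      exact Nat.le_trans ih (Nat.le_succ n)
    · exact Nat.le_refl _

theorem pvKeepLen_congr (l m : List String) (k : Nat)
    (h : ∀ j, j < k → l.getD j "" = m.getD j "") : pvKeepLen l k = pvKeepLen m k := by
  induction k with
  | zero => unfold pvKeepLen; simp
  | succ n ih =>
    unfold pvKeepLen
    simp only [Nat.add_sub_cancel]
    rw [h n (Nat.lt_succ_self n)]
    split
    · exact ih (fun j hj => h j (Nat.lt_trans hj (Nat.lt_succ_self n)))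
    · rfl

theorem stop_mem_iff (w : String) :
    PySem.Set.contains pvStopSet w = true ↔ w ∈ pvStopWords := by
  rw [PySem.Set.contains_iff]
  unfold pvStopSet pvStopWords
  rw [PySem.Set.mem_ofList]
  simp only [List.mem_cons, List.not_mem_nil, or_false]
  tauto

theorem getD_pred_eq_getLast (l : List String) :
    l.getD (l.length - 1) "" = l.getLast?.getD "" := by
  rw [List.getD_eq_getElem?_getD, List.getLast?_eq_getElem?]

theorem trim_eq_take (l : List String) : pvTrimA l = l.take (pvKeepLen l l.length) := by
  fun_induction pvTrimA l with
  | case1 l h ih =>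
    have hne := h.1
    have hlen : 0 < l.length := List.length_pos_iff.mpr hne
    have hstep : pvKeepLen l l.length = pvKeepLen l (l.length - 1) := by
      conv_lhs => rw [pvKeepLen]
      exact if_pos ⟨by omega, by
        rw [getD_pred_eq_getLast]; exact (stop_mem_iff _).mpr h.2⟩
    have hcongr : pvKeepLen l (l.length - 1) = pvKeepLen l.dropLast (l.length - 1) := by
      apply pvKeepLen_congr
      intro j hj
      rw [List.dropLast_eq_take, List.getD_eq_getElem?_getD, List.getD_eq_getElem?_getD,
        List.getElem?_take_of_lt (by omega)]
    have hdl : l.dropLast.length = l.length - 1 := by simp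
    have hle : pvKeepLen l.dropLast (l.length - 1) ≤ l.length - 1 := pvKeepLen_le _ _
    rw [ih, hstep, hcongr, hdl, List.dropLast_eq_take, List.take_take,
      Nat.min_eq_left (pvKeepLen_le _ _)]
  | case2 l h =>
    rcases List.eq_nil_or_concat l with rfl | ⟨ys, y, hl⟩
    · simp [pvKeepLen]
    · rw [List.concat_eq_append] at hl
      subst hl
      have hmem : (ys ++ [y]).getLast?.getD "" ∉ pvStopWords := by
        intro hm
        exact h ⟨by simp, hm⟩
      have : pvKeepLen (ys ++ [y]) (ys ++ [y]).length = (ys ++ [y]).length := by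
        unfold pvKeepLen
        rw [if_neg]
        rintro ⟨-, hc⟩
        rw [getD_pred_eq_getLast] at hc
        exact hmem ((stop_mem_iff _).mp hc)
      rw [this, List.take_length]

-- look-ahead-skip reference function: the common value of both second phases
def pvBf : List String → List String
  | [] => []
  | [w] => [w]
  | w :: w' :: s =>
      if (w = "a" ∨ w = "an") ∧ w' = "something" then pvBf (w' :: s)
      else w :: pvBf (w' :: s)

-- A's loop body, named for the proofs (definitionally the lambda in the port)
def pvBodyA (t : List String) (return_line : List String) (iw : Int × String) : List String :=
  (if iw.2 = "something" ∧
      (PySem.List.pyGetD t (max 0 (iw.1-1)) "" = "a" ∨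
       PySem.List.pyGetD t (max 0 (iw.1-1)) "" = "an")
   then return_line.dropLast else return_line) ++ [iw.2]

-- A's loop re-expressed with the previous word carried along instead of a global index
def pvStepA (prev : Option String) : List String → List String → List String
  | [], r => r
  | w :: s, r =>
      pvStepA (some w) s
        ((if w = "something" ∧ (prev = some "a" ∨ prev = some "an")
          then r.dropLast else r) ++ [w])

theorem stepA_of_foldl (t : List String) (s : List String) :
    ∀ (done r : List String), t = done ++ s →
      (PySem.List.enumerate s (done.length : Int)).foldl (pvBodyA t) r
        = pvStepA done.getLast? s r := by
  induction s with
  | nil => intro done r ht; simp [PySem.List.enumerate_nil, pvStepA]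
  | cons w s' ih =>
    intro done r ht
    rw [PySem.List.enumerate_cons, List.foldl_cons]
    have hbody : pvBodyA t r ((done.length : Int), w)
        = (if w = "something" ∧ (done.getLast? = some "a" ∨ done.getLast? = some "an")
           then r.dropLast else r) ++ [w] := by
      rcases List.eq_nil_or_concat done with rfl | ⟨ys, y, hd⟩
      · unfold pvBodyA
        subst ht
        simp only [List.length_nil, Nat.cast_zero, List.getLast?_nil, List.nil_append]
        have hidx : max 0 ((0 : Int) - 1) = 0 := by decide
        simp only [hidx, PySem.List.pyGetD_zero_cons]
        congr 1
        rw [if_neg, if_neg]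
        · rintro ⟨h1, h2⟩
          cases h2 <;> simp_all
        · rintro ⟨h1, h2⟩
          subst h1
          rcases h2 with h2 | h2 <;> simp_all
      · rw [List.concat_eq_append] at hd
        subst hd
        unfold pvBodyA
        have hlen : 0 < (ys ++ [y]).length := by simp
        have hidx : max 0 (((ys ++ [y]).length : Int) - 1)
            = (((ys ++ [y]).length - 1 : Nat) : Int) := by omega
        have hv : PySem.List.pyGetD t ((((ys ++ [y]).length - 1 : Nat) : Int)) "" = y := by
          rw [PySem.List.pyGetD_natCast, ht, List.getD_eq_getElem?_getD,
            List.getElem?_append_left (by omega), ← List.getD_eq_getElem?_getD,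
            getD_pred_eq_getLast, List.getLast?_concat]
          rfl
        simp only [hidx, hv, List.getLast?_concat, Option.some.injEq]
    rw [hbody]
    have hstart : (done.length : Int) + 1 = ((done ++ [w]).length : Int) := by
      simp
    rw [hstart, ih (done ++ [w]) _ (by simp [ht])]
    simp only [List.getLast?_concat]
    rfl

theorem stepA_eq_bf (s : List String) :
    ∀ (prev : Option String) (r : List String),
      pvStepA prev s r
        = (if s.head? = some "something" ∧ (prev = some "a" ∨ prev = some "an")
           then r.dropLast else r) ++ pvBf s := by
  induction s with
  | nil => intro prev r; simp [pvStepA, pvBf]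
  | cons w s' ih =>
    intro prev r
    show pvStepA (some w) s' _ = _
    rw [ih]
    simp only [List.head?_cons, Option.some.injEq]
    cases s' with
    | nil => simp [pvBf]
    | cons w' s'' =>
      simp only [List.head?_cons, Option.some.injEq, List.dropLast_concat, pvBf]
      by_cases hc : w' = "something" ∧ (w = "a" ∨ w = "an")
      · rw [if_pos hc]
        rw [if_pos (show (w = "a" ∨ w = "an") ∧ w' = "something" from ⟨hc.2, hc.1⟩)]
      · rw [if_neg hc]
        rw [if_neg (show ¬((w = "a" ∨ w = "an") ∧ w' = "something") from
          fun hx => hc ⟨hx.2, hx.1⟩)]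
        simp

-- B's loop body, named for the proofs (definitionally the lambda in the port)
def pvBodyB (out : List String) (cn : String × String) : List String :=
  if (cn.1 = "a" ∨ cn.1 = "an") ∧ cn.2 = "something" then out else out ++ [cn.1]

theorem phaseB_aux (t : List String) :
    ∀ (r : List String),
      (match t.getLast? with
       | some w => ((t.zip (t.drop 1)).foldl pvBodyB r) ++ [w]
       | none => (t.zip (t.drop 1)).foldl pvBodyB r)
        = r ++ pvBf t := by
  fun_induction pvBf t with
  | case1 => intro r; simp
  | case2 w => intro r; simp
  | case3 w w' s hc ih =>
    intro r
    simp only [List.drop_succ_cons, List.drop_zero, List.zip_cons_cons, List.foldl_cons,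
      List.getLast?_cons_cons]
    have hb : pvBodyB r (w, w') = r := by simp [pvBodyB, hc]
    have := ih (pvBodyB r (w, w'))
    simp only [List.drop_succ_cons, List.drop_zero] at this
    rw [this, hb]
  | case4 w w' s hc ih =>
    intro r
    simp only [List.drop_succ_cons, List.drop_zero, List.zip_cons_cons, List.foldl_cons,
      List.getLast?_cons_cons]
    have hb : pvBodyB r (w, w') = r ++ [w] := by simp [pvBodyB, hc]
    have := ih (pvBodyB r (w, w'))
    simp only [List.drop_succ_cons, List.drop_zero] at this
    rw [this, hb]
    simp

theorem phaseA_eq_bf (t : List String) :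
    (PySem.List.enumerate t 0).foldl (pvBodyA t) [] = pvBf t := by
  have h0 : (0 : Int) = (([] : List String).length : Int) := by simp
  rw [h0, stepA_of_foldl t t [] [] (by simp)]
  rw [stepA_eq_bf]
  rw [if_neg (by simp)]
  simp

-- ===== VERDICT (by name: the statement is the Claim_ definition above) =====
theorem remove_dummyword_spec : Claim_equal_remove_dummyword := by
  intro line _
  unfold Spec_remove_dummyword remove_dummyword remove_dummyword_alt
  rw [← trim_eq_take]
  have hA : (fun (return_line : List String) (iw : Int × String) =>
      let i := iw.1; let word := iw.2
      let return_line :=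
        if word = "something" ∧
            (PySem.List.pyGetD (pvTrimA line) (max 0 (i-1)) "" = "a" ∨
             PySem.List.pyGetD (pvTrimA line) (max 0 (i-1)) "" = "an")
        then return_line.dropLast else return_line
      return_line ++ [word]) = pvBodyA (pvTrimA line) := rfl
  have hB : (fun (out : List String) (cn : String × String) =>
      if (cn.1 = "a" ∨ cn.1 = "an") ∧ cn.2 = "something" then out
      else out ++ [cn.1]) = pvBodyB := rfl
  simp only [hA, hB]
  rw [phaseA_eq_bf, phaseB_aux]
  simp
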